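-- pv_equiv track=rewrite | github.com/ziphell/hermes-agent | tui_gateway/server.py | _fuzzy_basename_rank
-- ===== SOURCE A (Python) =====
-- def _fuzzy_basename_rank(name: str, query: str) -> tuple[int, int] | None:
--     """Rank ``name`` against ``query``; lower is better. Returns None to reject.
--
--     Tiers (kind):
--       0 — exact basename
--       1 — basename prefix (e.g. `app` → `appChrome.tsx`)
--       2 — word-boundary / camelCase hit (e.g. `chrome` → `appChrome.tsx`)
--       3 — substring anywhere in basename
--       4 — subsequence match (every query char appears in order)
--
--     Secondary key is `len(name)` so shorter names win ties.
--     """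
--     if not query:
--         return (3, len(name))
--
--     nl = name.lower()
--     ql = query.lower()
--
--     if nl == ql:
--         return (0, len(name))
--
--     if nl.startswith(ql):
--         return (1, len(name))
--
--     # Word-boundary split: `foo-bar_baz.qux` → ["foo","bar","baz","qux"].
--     # camelCase split: `appChrome` → ["app","Chrome"]. Cheap approximation;
--     # falls through to substring/subsequence if it misses.
--     parts: list[str] = []
--     buf = ""
--     for ch in name:
--         if ch in "-_." or (ch.isupper() and buf and not buf[-1].isupper()):
--             if buf:
--                 parts.append(buf)
--             buf = ch if ch not in "-_." else ""
--         else: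
--             buf += ch
--     if buf:
--         parts.append(buf)
--     for p in parts:
--         if p.lower().startswith(ql):
--             return (2, len(name))
--
--     if ql in nl:
--         return (3, len(name))
--
--     i = 0
--     for ch in nl:
--         if ch == ql[i]:
--             i += 1
--             if i == len(ql):
--                 return (4, len(name))
--
--     return None
-- ===== SOURCE B (Python) =====
-- def _words(s):
--     """Split s into word-boundary / camelCase parts via an index scan."""
--     words = []
--     i, n = 0, len(s)
--     while i < n:
--         if s[i] in "-_.":
--             i += 1
--             continue
--         j = i + 1
--         while j < n and s[j] not in "-_." and not (s[j].isupper() and not s[j - 1].isupper()):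
--             j += 1
--         words.append(s[i:j])
--         i = j
--     return words
--
--
-- def _is_subseq(q, s):
--     it = iter(s)
--     return all(c in it for c in q)
--
--
-- def _fuzzy_basename_rank(name: str, query: str) -> "tuple[int, int] | None":
--     if not query:
--         return (3, len(name))
--     nl = name.lower()
--     ql = query.lower()
--     tiers = []
--     if nl == ql:
--         tiers.append(0)
--     if nl.startswith(ql):
--         tiers.append(1)
--     if any(w.lower().startswith(ql) for w in _words(name)):
--         tiers.append(2)
--     if ql in nl:
--         tiers.append(3)
--     if _is_subseq(ql, nl):
--         tiers.append(4)
--     return (min(tiers), len(name)) if tiers else None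
-- ===== Notes on version B (the rewrite author's own statement) =====
-- stated objective: alternative
-- what changed: Replaces the early-return cascade and flush-buffer fold with a compute-all-tiers-then-min selection, an index-scan word splitter instead of the accumulator fold, and an iterator-consumption subsequence test instead of the counter loop.
import Mathlib
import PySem

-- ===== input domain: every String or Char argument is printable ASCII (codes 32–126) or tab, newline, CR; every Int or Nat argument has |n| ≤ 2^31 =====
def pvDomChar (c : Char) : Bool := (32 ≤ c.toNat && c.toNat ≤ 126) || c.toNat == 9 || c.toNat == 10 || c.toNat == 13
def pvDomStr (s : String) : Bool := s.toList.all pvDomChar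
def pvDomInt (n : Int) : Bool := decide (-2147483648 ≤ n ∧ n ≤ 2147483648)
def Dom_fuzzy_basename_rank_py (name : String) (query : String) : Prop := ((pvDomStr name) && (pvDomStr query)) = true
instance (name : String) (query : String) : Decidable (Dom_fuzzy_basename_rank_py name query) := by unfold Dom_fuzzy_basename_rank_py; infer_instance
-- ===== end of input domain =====

-- B replaces A's early-return cascade by a compute-all-tiers-then-min selection with a
-- different word splitter and subsequence test; objective: alternative (same cost).

-- ===== PORT A =====
def pvSep (c : Char) : Bool := c = '-' || c = '_' || c = '.'

-- one step of A's `for ch in name` buffer/parts loop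
def fuzzyStepA (st : List (List Char) × List Char) (ch : Char) : List (List Char) × List Char :=
  if pvSep ch then
    (if st.2 = [] then st.1 else st.1 ++ [st.2], [])
  else if PySem.Chars.isupper ch && !(st.2 = []) && !PySem.Chars.isupper (st.2.getLastD ' ') then
    (st.1 ++ [st.2], [ch])
  else (st.1, st.2 ++ [ch])

-- A's subsequence loop with counter i; `ch == ql[i]` is exact since i < ql.length is invariant
def subseqA (ql : List Char) : List Char → Nat → Bool
  | [], _ => false
  | c :: t, i =>
    if ql[i]? = some c then
      (if i + 1 = ql.length then true else subseqA ql t (i + 1))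
    else subseqA ql t i

def fuzzy_basename_rank_py (name : String) (query : String) : Option (Int × Int) :=
  if query.toList = [] then some (3, PySem.Str.len name)
  else
    let nl := PySem.Chars.lower name.toList
    let ql := PySem.Chars.lower query.toList
    if nl = ql then some (0, PySem.Str.len name)
    else if PySem.Chars.startswith nl ql then some (1, PySem.Str.len name)
    else
      let st := name.toList.foldl fuzzyStepA ([], [])
      let parts := if st.2 = [] then st.1 else st.1 ++ [st.2]
      if parts.any (fun p => PySem.Chars.startswith (PySem.Chars.lower p) ql) then
        some (2, PySem.Str.len name)
      else if PySem.Chars.isIn ql nl then some (3, PySem.Str.len name)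
      else if subseqA ql nl 0 then some (4, PySem.Str.len name)
      else none

-- ===== PORT B =====
-- B's membership test `c in "-_."`
def pvSepB (c : Char) : Bool := c = '-' || c = '_' || c = '.'

-- B's inner `while j < n and …` scan: extend a word whose last char so far is `prev`
def takeWordB (prev : Char) : List Char → List Char × List Char
  | [] => ([], [])
  | c :: t =>
    if pvSepB c || (PySem.Chars.isupper c && !PySem.Chars.isupper prev) then ([], c :: t)
    else
      let (w, r) := takeWordB c t
      (c :: w, r)

theorem takeWordB_rest_length (prev : Char) (l : List Char) :
    (takeWordB prev l).2.length ≤ l.length := by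
  induction l generalizing prev with
  | nil => simp [takeWordB]
  | cons c t ih =>
    simp only [takeWordB]
    split
    · simp
    · simpa using Nat.le_succ_of_le (ih c)

-- B's outer `while i < n` scan producing the word list
def wordsB : List Char → List (List Char)
  | [] => []
  | c :: t =>
    if pvSepB c then wordsB t
    else (c :: (takeWordB c t).1) :: wordsB (takeWordB c t).2
termination_by l => l.length
decreasing_by
  · simp
  · exact Nat.lt_succ_of_le (takeWordB_rest_length c t)

-- B's `_is_subseq` (the iterator-consumption matcher `all(c in it for c in q)`)
def isSubB : List Char → List Char → Bool
  | [], _ => true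
  | _ :: _, [] => false
  | qc :: qt, c :: t => if c = qc then isSubB qt t else isSubB (qc :: qt) t

def fuzzy_basename_rank_py_alt (name : String) (query : String) : Option (Int × Int) :=
  if query.toList = [] then some (3, PySem.Str.len name)
  else
    let nl := PySem.Chars.lower name.toList
    let ql := PySem.Chars.lower query.toList
    let tiers : List Int :=
      (if nl = ql then [0] else []) ++
      (if PySem.Chars.startswith nl ql then [1] else []) ++
      (if (wordsB name.toList).any (fun w => PySem.Chars.startswith (PySem.Chars.lower w) ql) then [2] else []) ++
      (if PySem.Chars.isIn ql nl then [3] else []) ++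
      (if isSubB ql nl then [4] else [])
    match PySem.List.min? tiers (fun x => x) with
    | some m => some (m, PySem.Str.len name)
    | none => none

-- ===== PRECONDITION & SPEC =====
def Spec_fuzzy_basename_rank_py (name : String) (query : String) (out : Option (Int × Int)) : Prop := out = fuzzy_basename_rank_py_alt name query
instance (name : String) (query : String) (out : Option (Int × Int)) : Decidable (Spec_fuzzy_basename_rank_py name query out) := by unfold Spec_fuzzy_basename_rank_py; infer_instance

-- ===== CLAIM (what is proved, stated in full; the proofs are below) =====
def Claim_equal_fuzzy_basename_rank_py : Prop := ∀ (name : String) (query : String), Dom_fuzzy_basename_rank_py name query → Spec_fuzzy_basename_rank_py name query (fuzzy_basename_rank_py name query)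

-- ===== LEMMAS AND PROOFS =====

theorem pvSepB_eq (c : Char) : pvSepB c = pvSep c := rfl

-- A's flush-buffer fold equals B's index-scan splitter: combined invariant for empty and
-- nonempty buffer, by one induction over the remaining characters.
theorem foldA_words (l : List Char) :
    (∀ parts : List (List Char),
        (let st := l.foldl fuzzyStepA (parts, []);
         if st.2 = [] then st.1 else st.1 ++ [st.2]) = parts ++ wordsB l) ∧
    (∀ (parts : List (List Char)) (buf : List Char) (bc : Char),
        (let st := l.foldl fuzzyStepA (parts, buf ++ [bc]);
         if st.2 = [] then st.1 else st.1 ++ [st.2]) =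
          parts ++ ((buf ++ [bc]) ++ (takeWordB bc l).1) :: wordsB (takeWordB bc l).2) := by
  induction l with
  | nil => constructor <;> intros <;> simp [pvSepB_eq, wordsB, takeWordB]
  | cons c t ih =>
    constructor
    · intro parts
      by_cases hsep : pvSep c = true
      · simp only [pvSepB_eq, List.foldl_cons, fuzzyStepA, hsep, if_pos, if_true, wordsB]
        simpa [hsep] using ih.1 parts
      · have h2 : (PySem.Chars.isupper c && !(([] : List Char) = []) && !PySem.Chars.isupper (([] : List Char).getLastD ' ')) = false := by simp
        simp only [List.foldl_cons, fuzzyStepA, hsep, if_neg, if_false, h2, Bool.false_eq_true]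
        have := ih.2 parts [] c
        simp only [List.nil_append] at this ⊢
        rw [show ([c] : List Char) = [] ++ [c] by simp] at this ⊢
        simpa [pvSepB_eq, wordsB, hsep] using this
    · intro parts buf bc
      by_cases hsep : pvSep c = true
      · simp only [List.foldl_cons, fuzzyStepA, hsep, if_pos, if_true]
        have hb : (buf ++ [bc] : List Char) ≠ [] := by simp
        simp only [pvSepB_eq, hb, if_neg, takeWordB, hsep, Bool.true_or, if_pos, wordsB, if_true]
        simpa [hb] using ih.1 (parts ++ [buf ++ [bc]])
      · by_cases hcam : (PySem.Chars.isupper c && !PySem.Chars.isupper bc) = true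
        · have hb : (buf ++ [bc] : List Char) ≠ [] := by simp
          have hcond : (PySem.Chars.isupper c && !((buf ++ [bc] : List Char) = []) && !PySem.Chars.isupper ((buf ++ [bc] : List Char).getLastD ' ')) = true := by
            simp only [List.getLastD_concat]
            simp only [Bool.and_eq_true] at hcam ⊢
            exact ⟨⟨hcam.1, by simp⟩, hcam.2⟩
          simp only [List.foldl_cons, fuzzyStepA, hsep, if_neg, hcond, if_pos, Bool.false_eq_true, if_false, if_true]
          have := ih.2 (parts ++ [buf ++ [bc]]) [] c
          simp only [List.nil_append] at this
          rw [show ([c] : List Char) = [] ++ [c] by simp] at this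
          simp only [pvSepB_eq, takeWordB, hsep, hcam, Bool.false_or, if_pos, wordsB, Bool.false_eq_true, if_false]
          simpa using this
        · have hcond : (PySem.Chars.isupper c && !((buf ++ [bc] : List Char) = []) && !PySem.Chars.isupper ((buf ++ [bc] : List Char).getLastD ' ')) = false := by
            simp only [List.getLastD_concat]
            cases hu : PySem.Chars.isupper c
            · simp
            · cases hp : PySem.Chars.isupper bc
              · exact absurd (by simp [hu, hp]) hcam
              · simp
          simp only [List.foldl_cons, fuzzyStepA, hsep, if_neg, hcond, Bool.false_eq_true, if_false]
          have := ih.2 parts (buf ++ [bc]) c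
          simp only [pvSepB_eq, takeWordB, hsep, hcam, Bool.false_or, Bool.false_eq_true, if_false]
          simpa using this

-- A's counter loop equals B's structural matcher, at any in-range counter
theorem subseqA_eq_isSubB (ql : List Char) (s : List Char) :
    ∀ i, i < ql.length → subseqA ql s i = isSubB (ql.drop i) s := by
  induction s with
  | nil =>
    intro i hi
    have : ql.drop i ≠ [] := by
      simp [List.drop_eq_nil_iff]; omega
    cases h : ql.drop i with
    | nil => exact absurd h this
    | cons a b => simp [subseqA, isSubB]
  | cons c t ih =>
    intro i hi
    have hd : ql.drop i = ql[i] :: ql.drop (i + 1) := List.drop_eq_getElem_cons hi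
    have hget : ql[i]? = some ql[i] := List.getElem?_eq_getElem hi
    rw [hd]
    simp only [subseqA, hget, isSubB]
    by_cases hc : c = ql[i]
    · have : (some ql[i] = some c) = True := by simp [hc]
      simp only [hc, if_pos rfl, this, if_true]
      by_cases hend : i + 1 = ql.length
      · simp [if_pos hend, hend, isSubB]
      · have hlt : i + 1 < ql.length := by omega
        simp [if_neg hend, ih (i + 1) hlt]
    · have hne : ¬ ((some ql[i] : Option Char) = some c) := fun h => hc (Option.some.inj h).symm
      rw [if_neg hne, if_neg hc, ih i hi, hd]

-- ===== VERDICT (by name: the statement is the Claim_ definition above) =====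
theorem fuzzy_basename_rank_py_spec : Claim_equal_fuzzy_basename_rank_py := by
  intro name query _
  unfold Spec_fuzzy_basename_rank_py fuzzy_basename_rank_py fuzzy_basename_rank_py_alt
  by_cases hq : query.toList = []
  · simp [hq]
  · simp only [hq, if_neg, Bool.false_eq_true, if_false]
    have hql : PySem.Chars.lower query.toList ≠ [] := by
      cases h : query.toList with
      | nil => exact absurd h hq
      | cons a b => simp [PySem.Chars.lower, h]
    have hparts := (foldA_words name.toList).1 []
    simp only [List.nil_append] at hparts
    have hsub := subseqA_eq_isSubB (PySem.Chars.lower query.toList)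
      (PySem.Chars.lower name.toList) 0 (by cases h : PySem.Chars.lower query.toList with
        | nil => exact absurd h hql
        | cons a b => simp [h])
    simp only [List.drop_zero] at hsub
    rw [hparts, hsub]
    split_ifs <;> simp [PySem.List.min?]
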